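-- pv_equiv track=rewrite | github.com/Kenny-Stilyan/SoftUni | Programming Fundamentals with Python/Lists Advanced/kate's_way_out.py | find_way_out
-- ===== SOURCE A (Python) =====
-- def is_valid_move(maze, visited, row, col):
--     num_rows = len(maze)
--     num_cols = len(maze[0])
--
--     # Check if the move is within the maze boundaries
--     if row < 0 or row >= num_rows or col < 0 or col >= num_cols:
--         return False
--
--     # Check if the move is not a wall and has not been visited before
--     if maze[row][col] == '#' or visited[row][col]:
--         return False
--
--     return True
--
-- def dfs(maze, visited, row, col, num_moves):
--     num_rows = len(maze)
--     num_cols = len(maze[0])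
--
--     # Check if Kate has reached the maze boundaries
--     if row == 0 or row == num_rows - 1 or col == 0 or col == num_cols - 1:
--         return num_moves
--
--     # Mark the current position as visited
--     visited[row][col] = True
--
--     # Explore the four possible moves: up, down, left, right
--     moves = [(row-1, col), (row+1, col), (row, col-1), (row, col+1)]
--     longest_path = 0
--
--     for move in moves:
--         next_row, next_col = move
--
--         if is_valid_move(maze, visited, next_row, next_col):
--             path_length = dfs(maze, visited, next_row, next_col, num_moves + 1)
--             longest_path = max(longest_path, path_length)
--
--     # Mark the current position as unvisited (backtracking)
--     visited[row][col] = False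
--
--     return longest_path
--
-- def find_way_out(maze):
--     num_rows = len(maze)
--     num_cols = len(maze[0])
--
--     # Find Kate's initial position
--     start_row, start_col = None, None
--     for row in range(num_rows):
--         for col in range(num_cols):
--             if maze[row][col] == 'k':
--                 start_row, start_col = row, col
--                 break
--
--     # Initialize the visited matrix
--     visited = [[False] * num_cols for _ in range(num_rows)]
--
--     # Run DFS to find the longest path
--     longest_path = dfs(maze, visited, start_row, start_col, 1)
--
--     if longest_path > 1:
--         return f"Kate got out in {longest_path} moves"
--     else:
--         return "Kate cannot get out"
-- ===== SOURCE B (Python) =====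
-- # Same exhaustive search decomposed iteratively: the recursive dfs is replaced by an
-- # explicit stack of frames (row, col, num_moves, next-move-index) with a global running
-- # best, marking on push and unmarking on pop.
-- def find_way_out(maze):
--     num_rows = len(maze)
--     num_cols = len(maze[0])
--
--     start_row, start_col = None, None
--     for row in range(num_rows):
--         for col in range(num_cols):
--             if maze[row][col] == 'k':
--                 start_row, start_col = row, col
--                 break
--
--     visited = [[False] * num_cols for _ in range(num_rows)]
--     best = 0
--     stack = []
--     if start_row == 0 or start_row == num_rows - 1 or start_col == 0 or start_col == num_cols - 1:
--         best = 1
--     else: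
--         visited[start_row][start_col] = True
--         stack.append([start_row, start_col, 1, 0])
--
--     while stack:
--         row, col, num_moves, i = stack[-1]
--         if i == 4:
--             visited[row][col] = False
--             stack.pop()
--             continue
--         stack[-1][3] = i + 1
--         nr, nc = ((row - 1, col), (row + 1, col), (row, col - 1), (row, col + 1))[i]
--         if 0 <= nr < num_rows and 0 <= nc < num_cols and maze[nr][nc] != '#' and not visited[nr][nc]:
--             if nr == 0 or nr == num_rows - 1 or nc == 0 or nc == num_cols - 1:
--                 best = max(best, num_moves + 1)
--             else:
--                 visited[nr][nc] = True
--                 stack.append([nr, nc, num_moves + 1, 0])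
--
--     if best > 1:
--         return f"Kate got out in {best} moves"
--     else:
--         return "Kate cannot get out"
-- ===== Notes on version B (the rewrite author's own statement) =====
-- stated objective: alternative
-- what changed: The recursive backtracking dfs helper is replaced by an explicit iterative stack machine: a stack of frames (row, col, num_moves, next-move-index) with a global running maximum, marking a cell on push and unmarking it on pop, and boundary hits folded into the running best instead of being returned up the recursion.
import Mathlib
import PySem

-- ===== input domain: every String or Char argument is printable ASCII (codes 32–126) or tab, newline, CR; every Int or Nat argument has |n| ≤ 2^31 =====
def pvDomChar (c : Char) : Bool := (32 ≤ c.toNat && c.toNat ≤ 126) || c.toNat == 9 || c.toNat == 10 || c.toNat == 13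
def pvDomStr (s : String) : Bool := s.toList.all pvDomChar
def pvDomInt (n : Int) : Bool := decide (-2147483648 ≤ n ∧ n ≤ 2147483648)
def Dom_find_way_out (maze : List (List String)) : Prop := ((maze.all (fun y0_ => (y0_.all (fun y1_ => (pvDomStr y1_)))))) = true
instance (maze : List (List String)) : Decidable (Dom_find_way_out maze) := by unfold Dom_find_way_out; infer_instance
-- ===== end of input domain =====

-- B replaces A's recursive backtracking dfs by an explicit iterative stack machine
-- (frames (row, col, num_moves, next-move-index), global running maximum, mark on push /
-- unmark on pop): alternative decomposition, same exhaustive search.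

-- ===== PORT A =====
-- maze[r][c] / visited[r][c]: every evaluated access is at a non-negative in-range index
-- (range-checked by the Python before the access), so the pyGetD default is never observed.
def cellAt (maze : List (List String)) (r c : Int) : String :=
  PySem.List.pyGetD (PySem.List.pyGetD maze r []) c ""

def vGet (v : List (List Bool)) (r c : Int) : Bool :=
  PySem.List.pyGetD (PySem.List.pyGetD v r []) c false

-- visited[row][col] = b  (in-place row update, state-passing)
def vSet (v : List (List Bool)) (r c : Int) (b : Bool) : List (List Bool) :=
  PySem.List.pySetD v r (PySem.List.pySetD (PySem.List.pyGetD v r []) c b)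

-- one step of the inner column scan (first 'k' in the row wins, like the Python 'break')
def scanColsA (maze : List (List String)) (row : Int) (st2 : Option Int) (col : Int) : Option Int :=
  match st2 with
  | some _ => st2
  | none => if cellAt maze row col == "k" then some col else none

-- one step of the outer row scan (a later row with a 'k' overwrites an earlier one)
def scanRowsA (maze : List (List String)) (st : Option (Int × Int)) (row : Int) : Option (Int × Int) :=
  match (PySem.List.pyRange 0 ((PySem.List.pyGetD maze 0 []).length : Int) 1).foldl
      (scanColsA maze row) none with
  | some c => some (row, c)
  | none => st

def is_valid_move (maze : List (List String)) (visited : List (List Bool)) (row col : Int) : Bool :=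
  let numRows : Int := maze.length
  let numCols : Int := (PySem.List.pyGetD maze 0 []).length
  if row < 0 ∨ numRows ≤ row ∨ col < 0 ∨ numCols ≤ col then false
  else if cellAt maze row col == "#" ∨ vGet visited row col then false
  else true

-- dfs, with the visited matrix threaded as state; fuel only makes the recursion total
-- (a fresh cell is marked at every recursive level, so rows*cols+1 at the call site suffices).
def dfsA (maze : List (List String)) : Nat → List (List Bool) → Int → Int → Int → Int × List (List Bool)
  | 0, v, _, _, _ => (0, v)
  | fuel + 1, v, row, col, numMoves =>
    let numRows : Int := maze.length
    let numCols : Int := (PySem.List.pyGetD maze 0 []).length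
    if row = 0 ∨ row = numRows - 1 ∨ col = 0 ∨ col = numCols - 1 then (numMoves, v)
    else
      let v1 := vSet v row col true
      let moves : List (Int × Int) := [(row - 1, col), (row + 1, col), (row, col - 1), (row, col + 1)]
      let res := moves.foldl (fun acc mv =>
        if is_valid_move maze acc.2 mv.1 mv.2 then
          let r := dfsA maze fuel acc.2 mv.1 mv.2 (numMoves + 1)
          (max acc.1 r.1, r.2)
        else acc) (0, v1)
      (res.1, vSet res.2 row col false)

def find_way_out (maze : List (List String)) : String :=
  let numRows : Int := maze.length
  let numCols : Int := (PySem.List.pyGetD maze 0 []).length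
  -- nested scan for 'k'; the inner 'break' makes each row contribute its first match,
  -- later rows overwrite earlier ones
  let start : Option (Int × Int) := (PySem.List.pyRange 0 numRows 1).foldl (scanRowsA maze) none
  let visited := List.replicate numRows.toNat (List.replicate numCols.toNat false)
  match start with
  | none => ""   -- Python raises TypeError here (no 'k'): excluded by Pre_find_way_out
  | some (sr, sc) =>
    let lp := (dfsA maze (maze.length * (PySem.List.pyGetD maze 0 []).length + 1) visited sr sc 1).1
    if lp > 1 then "Kate got out in " ++ PySem.Int.toStr lp ++ " moves"
    else "Kate cannot get out"

-- ===== PORT B =====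
-- the move tuple ((r-1,c),(r+1,c),(r,c-1),(r,c+1)) of B's while loop
def movesB (r c : Int) : List (Int × Int) := [(r - 1, c), (r + 1, c), (r, c - 1), (r, c + 1)]

-- the inline validity test of B's while loop: 0 <= nr < rows and 0 <= nc < cols and
-- maze[nr][nc] != '#' and not visited[nr][nc]
def validB (maze : List (List String)) (v : List (List Bool)) (r c : Int) : Bool :=
  decide (0 ≤ r) && decide (r < (maze.length : Int)) && decide (0 ≤ c) &&
    decide (c < ((PySem.List.pyGetD maze 0 []).length : Int)) &&
    !(cellAt maze r c == "#") && !(vGet v r c)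

-- B's while loop over the explicit stack of frames (row, col, num_moves, next-move-index),
-- with the visited matrix and the running best threaded as state; fuel only makes the loop
-- total (stepBound below is enough fuel for the exhaustive search, proved in the lemmas).
def runB (maze : List (List String)) : Nat → List (List Bool) → Int → List (Int × Int × Int × Int) → Int
  | 0, _, best, _ => best
  | _ + 1, _, best, [] => best
  | fuel + 1, v, best, (r, c, n, i) :: rest =>
    if i == 4 then
      -- moves exhausted: unmark and pop (backtracking)
      runB maze fuel (vSet v r c false) best rest
    else
      let nb := PySem.List.pyGetD (movesB r c) i (0, 0)
      let stack' := (r, c, n, i + 1) :: rest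
      if validB maze v nb.1 nb.2 then
        if nb.1 == 0 || nb.1 == (maze.length : Int) - 1 || nb.2 == 0 ||
            nb.2 == ((PySem.List.pyGetD maze 0 []).length : Int) - 1 then
          runB maze fuel v (max best (n + 1)) stack'
        else
          runB maze fuel (vSet v nb.1 nb.2 true) best ((nb.1, nb.2, n + 1, 0) :: stack')
      else runB maze fuel v best stack'

-- enough machine steps for a search over m still-free cells (5 steps per frame, ≤ 4 subsearches)
def stepBound : Nat → Nat
  | 0 => 5
  | m + 1 => 5 + 4 * stepBound m

def find_way_out_alt (maze : List (List String)) : String :=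
  let rows : Int := maze.length
  let cols : Int := (PySem.List.pyGetD maze 0 []).length
  -- the same nested scan for 'k' as A (B's Python keeps it verbatim)
  let start : Option (Int × Int) := (PySem.List.pyRange 0 rows 1).foldl (scanRowsA maze) none
  match start with
  | none => ""   -- Python raises TypeError here (no 'k'): excluded by Pre_find_way_out
  | some (sr, sc) =>
    let visited := List.replicate rows.toNat (List.replicate cols.toNat false)
    let best : Int :=
      if sr == 0 || sr == rows - 1 || sc == 0 || sc == cols - 1 then 1
      else runB maze (stepBound (rows.toNat * cols.toNat)) (vSet visited sr sc true) 0 [(sr, sc, 1, 0)]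
    if best > 1 then "Kate got out in " ++ PySem.Int.toStr best ++ " moves"
    else "Kate cannot get out"

-- ===== PRECONDITION & SPEC =====
-- Pre_ excludes exactly the inputs where the Python A raises: the empty maze (maze[0] is an
-- IndexError), a row shorter than the first row (IndexError while scanning/moving), and a maze
-- with no 'k' among the first len(maze[0]) entries of any row (start stays None: TypeError).
def Pre_find_way_out (maze : List (List String)) : Prop :=
  maze ≠ [] ∧
  (∀ row ∈ maze, (maze.headD []).length ≤ row.length) ∧
  (∃ row ∈ maze, "k" ∈ row.take (maze.headD []).length)
instance (maze : List (List String)) : Decidable (Pre_find_way_out maze) := by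
  unfold Pre_find_way_out; infer_instance

def pvWitness_find_way_out : List (List String) :=
  [[".", ".", "."], [".", "k", "."], [".", ".", "."]]

def Spec_find_way_out (maze : List (List String)) (out : String) : Prop := out = find_way_out_alt maze
instance (maze : List (List String)) (out : String) : Decidable (Spec_find_way_out maze out) := by
  unfold Spec_find_way_out; infer_instance

-- ===== CLAIM (what is proved, stated in full; the proofs are below) =====
def Claim_equal_find_way_out : Prop := ∀ (maze : List (List String)), Dom_find_way_out maze → Pre_find_way_out maze → Spec_find_way_out maze (find_way_out maze)

-- ===== LEMMAS AND PROOFS =====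

-- termination helper for the recursive reference search below
theorem pv_diff_singleton_length_lt (o : List (Int × Int)) (nb : Int × Int) (h : nb ∈ o) :
    (PySem.Set.diff o [nb]).length < o.length := by
  unfold PySem.Set.diff
  exact List.length_filter_lt_length_iff_exists.mpr ⟨nb, h, by simp⟩

-- proof-side recursive characterisation of the search (both ports are proved equal to it)
mutual
def longest_exit (o : List (Int × Int)) (r c n rows cols : Int) : Int :=
  if r = 0 ∨ r = rows - 1 ∨ c = 0 ∨ c = cols - 1 then n
  else tryMoves [(r - 1, c), (r + 1, c), (r, c - 1), (r, c + 1)] o n 0 rows cols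
termination_by (o.length, 5)

def tryMoves (ms : List (Int × Int)) (o : List (Int × Int)) (n best rows cols : Int) : Int :=
  match ms with
  | [] => best
  | nb :: rest =>
    if h : nb ∈ o then
      tryMoves rest o n (max best (longest_exit (PySem.Set.diff o [nb]) nb.1 nb.2 (n + 1) rows cols)) rows cols
    else tryMoves rest o n best rows cols
termination_by (o.length, ms.length)
decreasing_by
  all_goals first
  | exact Prod.Lex.left _ _ (pv_diff_singleton_length_lt o nb h)
  | exact Prod.Lex.right _ (by simp)
end

-- During the search, the free-cell set o corresponds to the visited matrix:
-- a cell is in o iff it is in range, not a wall, unvisited, and not the current cell.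
def InvW (maze : List (List String)) (v : List (List Bool)) (o : List (Int × Int)) (r c : Int) : Prop :=
  v.length = maze.length ∧
  (∀ row ∈ v, row.length = (PySem.List.pyGetD maze 0 []).length) ∧
  o.Nodup ∧
  0 ≤ r ∧ r < (maze.length : Int) ∧ 0 ≤ c ∧ c < ((PySem.List.pyGetD maze 0 []).length : Int) ∧
  vGet v r c = false ∧
  (∀ p : Int × Int, p ∈ o ↔
    (0 ≤ p.1 ∧ p.1 < (maze.length : Int) ∧ 0 ≤ p.2 ∧ p.2 < ((PySem.List.pyGetD maze 0 []).length : Int) ∧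
     cellAt maze p.1 p.2 ≠ "#" ∧ vGet v p.1 p.2 = false ∧ p ≠ (r, c)))

-- shape of the visited matrix
def VShape (maze : List (List String)) (v : List (List Bool)) : Prop :=
  v.length = maze.length ∧ ∀ row ∈ v, row.length = (PySem.List.pyGetD maze 0 []).length

theorem vSet_eq_set (maze : List (List String)) (v : List (List Bool)) (r c : Int) (b : Bool)
    (hr0 : 0 ≤ r) (hr1 : r < (maze.length : Int)) (hc0 : 0 ≤ c) (hs : VShape maze v) :
    vSet v r c b = v.set r.toNat (v[r.toNat]'(by have := hs.1; omega) |>.set c.toNat b) := by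
  have hlt : r.toNat < v.length := by have := hs.1; omega
  unfold vSet
  rw [PySem.List.pySetD_of_nonneg _ _ hr0, PySem.List.pySetD_of_nonneg _ _ hc0,
    PySem.List.pyGetD_eq_getElem v [] hr0 (by have := hs.1; omega)]

theorem vGet_eq_getElem (maze : List (List String)) (v : List (List Bool)) (r c : Int)
    (hr0 : 0 ≤ r) (hr1 : r < (maze.length : Int)) (hc0 : 0 ≤ c) (hs : VShape maze v) :
    vGet v r c = (v[r.toNat]'(by have := hs.1; omega)).getD c.toNat false := by
  have hlt : r.toNat < v.length := by have := hs.1; omega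
  unfold vGet
  rw [PySem.List.pyGetD_eq_getElem v [] hr0 (by have := hs.1; omega)]
  rcases lt_or_ge c ((v[r.toNat]'hlt).length : Int) with hcl | hcl
  · rw [PySem.List.pyGetD_eq_getElem _ _ hc0 hcl, List.getD_eq_getElem _ _ (by omega)]
  · rw [PySem.List.pyGetD_of_none _ _ _ (by
      rw [PySem.List.pyGet?_eq_none_iff]
      simp [PySem.Raise.InRange]
      omega)]
    rw [List.getD_eq_default]
    omega

theorem vShape_vSet (maze : List (List String)) (v : List (List Bool)) (r c : Int) (b : Bool)
    (hr0 : 0 ≤ r) (hr1 : r < (maze.length : Int)) (hc0 : 0 ≤ c)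
    (hs : VShape maze v) : VShape maze (vSet v r c b) := by
  rw [vSet_eq_set maze v r c b hr0 hr1 hc0 hs]
  constructor
  · rw [List.length_set]; exact hs.1
  · intro row hrow
    rcases List.mem_or_eq_of_mem_set hrow with h | h
    · exact hs.2 row h
    · subst h
      rw [List.length_set]
      exact hs.2 _ (List.getElem_mem _)

theorem vGet_vSet_self (maze : List (List String)) (v : List (List Bool)) (r c : Int) (b : Bool)
    (hr0 : 0 ≤ r) (hr1 : r < (maze.length : Int)) (hc0 : 0 ≤ c)
    (hc1 : c < ((PySem.List.pyGetD maze 0 []).length : Int)) (hs : VShape maze v) :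
    vGet (vSet v r c b) r c = b := by
  have hlt : r.toNat < v.length := by have := hs.1; omega
  have hrowlen : (v[r.toNat]'hlt).length = (PySem.List.pyGetD maze 0 []).length :=
    hs.2 _ (List.getElem_mem _)
  have hs2 : VShape maze (v.set r.toNat ((v[r.toNat]'hlt).set c.toNat b)) := by
    rw [← vSet_eq_set maze v r c b hr0 hr1 hc0 hs]
    exact vShape_vSet maze v r c b hr0 hr1 hc0 hs
  rw [vSet_eq_set maze v r c b hr0 hr1 hc0 hs,
    vGet_eq_getElem maze _ r c hr0 hr1 hc0 hs2]
  rw [List.getD_eq_getElem _ _ (by simp; omega)]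
  simp

theorem vGet_vSet_ne (maze : List (List String)) (v : List (List Bool)) (r c r' c' : Int) (b : Bool)
    (hr0 : 0 ≤ r) (hr1 : r < (maze.length : Int)) (hc0 : 0 ≤ c)
    (_hc1 : c < ((PySem.List.pyGetD maze 0 []).length : Int))
    (hr0' : 0 ≤ r') (hr1' : r' < (maze.length : Int)) (hc0' : 0 ≤ c')
    (hc1' : c' < ((PySem.List.pyGetD maze 0 []).length : Int)) (hne : (r', c') ≠ (r, c))
    (hs : VShape maze v) :
    vGet (vSet v r c b) r' c' = vGet v r' c' := by
  have hlt : r.toNat < v.length := by have := hs.1; omega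
  have hlt' : r'.toNat < v.length := by have := hs.1; omega
  have hrowlen : (v[r.toNat]'hlt).length = (PySem.List.pyGetD maze 0 []).length :=
    hs.2 _ (List.getElem_mem _)
  have hrowlen' : (v[r'.toNat]'hlt').length = (PySem.List.pyGetD maze 0 []).length :=
    hs.2 _ (List.getElem_mem _)
  have hs2 : VShape maze (v.set r.toNat ((v[r.toNat]'hlt).set c.toNat b)) := by
    rw [← vSet_eq_set maze v r c b hr0 hr1 hc0 hs]
    exact vShape_vSet maze v r c b hr0 hr1 hc0 hs
  rw [vSet_eq_set maze v r c b hr0 hr1 hc0 hs,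
    vGet_eq_getElem maze _ r' c' hr0' hr1' hc0' hs2,
    vGet_eq_getElem maze v r' c' hr0' hr1' hc0' hs]
  rcases eq_or_ne r'.toNat r.toNat with hrr | hrr
  · have hre : r' = r := by omega
    subst hre
    have hcc : c'.toNat ≠ c.toNat := by
      intro hcontra
      have : c' = c := by omega
      exact hne (by simp [this])
    simp only [List.getElem_set_self]
    rw [List.getD_eq_getElem _ _ (by rw [List.length_set]; omega),
      List.getD_eq_getElem _ _ (by omega)]
    simp only [List.getElem_set, if_neg (Ne.symm hcc)]
  · simp only [List.getElem_set, if_neg (Ne.symm hrr)]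

theorem vSet_restore (maze : List (List String)) (v : List (List Bool)) (r c : Int)
    (hr0 : 0 ≤ r) (hr1 : r < (maze.length : Int)) (hc0 : 0 ≤ c)
    (hc1 : c < ((PySem.List.pyGetD maze 0 []).length : Int)) (hs : VShape maze v)
    (hf : vGet v r c = false) :
    vSet (vSet v r c true) r c false = v := by
  have hlt : r.toNat < v.length := by have := hs.1; omega
  have hrowlen : (v[r.toNat]'hlt).length = (PySem.List.pyGetD maze 0 []).length :=
    hs.2 _ (List.getElem_mem _)
  have hclt : c.toNat < (v[r.toNat]'hlt).length := by omega
  have hs2 : VShape maze (v.set r.toNat ((v[r.toNat]'hlt).set c.toNat true)) := by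
    rw [← vSet_eq_set maze v r c true hr0 hr1 hc0 hs]
    exact vShape_vSet maze v r c true hr0 hr1 hc0 hs
  have hv : (v[r.toNat]'hlt)[c.toNat]'hclt = false := by
    have := vGet_eq_getElem maze v r c hr0 hr1 hc0 hs
    rw [hf, List.getD_eq_getElem _ _ hclt] at this
    exact this.symm
  rw [vSet_eq_set maze v r c true hr0 hr1 hc0 hs,
    vSet_eq_set maze _ r c false hr0 hr1 hc0 hs2]
  simp only [List.getElem_set_self, List.set_set]
  rw [← hv, List.set_getElem_self, List.set_getElem_self]

theorem valid_iff (maze : List (List String)) (v : List (List Bool)) (o : List (Int × Int))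
    (r c nr nc : Int) (hInv : InvW maze v o r c)
    (h1 : 0 ≤ nr) (h2 : nr < (maze.length : Int)) (h3 : 0 ≤ nc)
    (h4 : nc < ((PySem.List.pyGetD maze 0 []).length : Int)) :
    (is_valid_move maze (vSet v r c true) nr nc = true) ↔ (nr, nc) ∈ o := by
  obtain ⟨hl, hrows, hnd, hr0, hr1, hc0, hc1, hvrc, hiff⟩ := hInv
  have hs : VShape maze v := ⟨hl, hrows⟩
  simp only [is_valid_move]
  rw [if_neg (by omega)]
  rw [hiff (nr, nc)]
  by_cases hrc : (nr, nc) = (r, c)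
  · have h1' : vGet (vSet v r c true) nr nc = true := by
      rw [show nr = r from congrArg Prod.fst hrc, show nc = c from congrArg Prod.snd hrc]
      exact vGet_vSet_self maze v r c true hr0 hr1 hc0 hc1 hs
    rw [if_pos (Or.inr (by simp [h1']))]
    simp [hrc]
  · have h1' : vGet (vSet v r c true) nr nc = vGet v nr nc :=
      vGet_vSet_ne maze v r c nr nc true hr0 hr1 hc0 hc1 h1 h2 h3 h4 hrc hs
    by_cases hwall : cellAt maze nr nc = "#"
    · rw [if_pos (Or.inl (by simp [hwall]))]
      simp [hwall]
    · by_cases hvis : vGet v nr nc = true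
      · rw [if_pos (Or.inr (by simp [h1', hvis]))]
        simp [hvis]
      · rw [if_neg (by simp [hwall, h1', hvis])]
        simp only [true_iff]
        refine ⟨h1, h2, h3, h4, hwall, by simpa using hvis, hrc⟩

theorem inv_step (maze : List (List String)) (v : List (List Bool)) (o : List (Int × Int))
    (r c : Int) (hInv : InvW maze v o r c) (nb : Int × Int) (hnb : nb ∈ o) :
    InvW maze (vSet v r c true) (PySem.Set.diff o [nb]) nb.1 nb.2 := by
  obtain ⟨hl, hrows, hnd, hr0, hr1, hc0, hc1, hvrc, hiff⟩ := hInv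
  have hs : VShape maze v := ⟨hl, hrows⟩
  obtain ⟨hb1, hb2, hb3, hb4, hwall, hvnb, hner⟩ := (hiff nb).mp hnb
  have hs1 := vShape_vSet maze v r c true hr0 hr1 hc0 hs
  refine ⟨hs1.1, hs1.2, PySem.Set.nodup_diff _ _ hnd, hb1, hb2, hb3, hb4, ?_, ?_⟩
  · rw [vGet_vSet_ne maze v r c nb.1 nb.2 true hr0 hr1 hc0 hc1 hb1 hb2 hb3 hb4
      (by rw [Prod.mk.eta]; exact hner) hs]
    exact hvnb
  · intro p
    rw [PySem.Set.mem_diff, hiff p]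
    constructor
    · rintro ⟨⟨p1, p2, p3, p4, pw, pv, pne⟩, hpnb⟩
      have hpnb' : p ≠ nb := by simpa using hpnb
      refine ⟨p1, p2, p3, p4, pw, ?_, by rw [Prod.mk.eta]; exact hpnb'⟩
      rw [vGet_vSet_ne maze v r c p.1 p.2 true hr0 hr1 hc0 hc1 p1 p2 p3 p4
        (by rw [Prod.mk.eta]; exact pne) hs]
      exact pv
    · rintro ⟨p1, p2, p3, p4, pw, pv1, pnb⟩
      by_cases hprc : p = (r, c)
      · exfalso
        have hsel := vGet_vSet_self maze v r c true hr0 hr1 hc0 hc1 hs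
        rw [show p.1 = r from congrArg Prod.fst hprc, show p.2 = c from congrArg Prod.snd hprc,
          hsel] at pv1
        exact Bool.true_eq_false.mp pv1
      · have hrw := vGet_vSet_ne maze v r c p.1 p.2 true hr0 hr1 hc0 hc1 p1 p2 p3 p4
          (by rw [Prod.mk.eta]; exact hprc) hs
        exact ⟨⟨p1, p2, p3, p4, pw, by rw [← hrw]; exact pv1, hprc⟩, by simpa using pnb⟩

theorem loopA (maze : List (List String)) (fuel : Nat) (n rows cols : Int) :
    ∀ (ms : List (Int × Int)) (o : List (Int × Int)) (v1 : List (List Bool)) (lp : Int),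
    (∀ nb ∈ ms, (is_valid_move maze v1 nb.1 nb.2 = true ↔ nb ∈ o)) →
    (∀ nb ∈ ms, nb ∈ o → dfsA maze fuel v1 nb.1 nb.2 (n + 1) =
        (longest_exit (PySem.Set.diff o [nb]) nb.1 nb.2 (n + 1) rows cols, v1)) →
    ms.foldl (fun acc mv =>
        if is_valid_move maze acc.2 mv.1 mv.2 then
          let r := dfsA maze fuel acc.2 mv.1 mv.2 (n + 1)
          (max acc.1 r.1, r.2)
        else acc) (lp, v1)
      = (tryMoves ms o n lp rows cols, v1) := by
  intro ms
  induction ms with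
  | nil => intro o v1 lp hv hd; simp [tryMoves]
  | cons nb rest ih =>
    intro o v1 lp hv hd
    rw [List.foldl_cons]
    by_cases hm : nb ∈ o
    · have hvalid := (hv nb (by simp)).mpr hm
      have hcall := hd nb (by simp) hm
      simp only [hvalid, hcall, if_true]
      rw [ih o v1 _ (fun x hx => hv x (by simp [hx])) (fun x hx hxo => hd x (by simp [hx]) hxo)]
      conv_rhs => rw [tryMoves]
      rw [dif_pos hm]
    · have hvalid : ¬ (is_valid_move maze v1 nb.1 nb.2 = true) := fun hcontra => hm ((hv nb (by simp)).mp hcontra)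
      simp only [Bool.not_eq_true] at hvalid
      simp only [hvalid, if_false, Bool.false_eq_true]
      rw [ih o v1 _ (fun x hx => hv x (by simp [hx])) (fun x hx hxo => hd x (by simp [hx]) hxo)]
      conv_rhs => rw [tryMoves]
      rw [dif_neg hm]

theorem dfs_eq (maze : List (List String)) :
    ∀ (fuel : Nat) (o : List (Int × Int)) (v : List (List Bool)) (r c n : Int),
    InvW maze v o r c → o.length < fuel →
    dfsA maze fuel v r c n =
      (longest_exit o r c n (maze.length : Int) ((PySem.List.pyGetD maze 0 []).length : Int), v) := by
  intro fuel
  induction fuel with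
  | zero => intro o v r c n hInv hlen; exact absurd hlen (by omega)
  | succ fuel ih =>
    intro o v r c n hInv hlen
    obtain ⟨hl, hrows, hnd, hr0, hr1, hc0, hc1, hvrc, hiff⟩ := hInv
    have hInv' : InvW maze v o r c := ⟨hl, hrows, hnd, hr0, hr1, hc0, hc1, hvrc, hiff⟩
    have hs : VShape maze v := ⟨hl, hrows⟩
    simp only [dfsA]
    rw [longest_exit]
    by_cases hb : r = 0 ∨ r = (maze.length : Int) - 1 ∨ c = 0 ∨
        c = ((PySem.List.pyGetD maze 0 []).length : Int) - 1
    · rw [if_pos hb, if_pos hb]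
    · rw [if_neg hb, if_neg hb]
      simp only [not_or] at hb
      obtain ⟨hb1, hb2, hb3, hb4⟩ := hb
      have hnbrs : ∀ nb ∈ [(r - 1, c), (r + 1, c), (r, c - 1), (r, c + 1)],
          0 ≤ nb.1 ∧ nb.1 < (maze.length : Int) ∧ 0 ≤ nb.2 ∧
          nb.2 < ((PySem.List.pyGetD maze 0 []).length : Int) := by
        intro nb hnb
        simp only [List.mem_cons, List.not_mem_nil, or_false] at hnb
        rcases hnb with h | h | h | h <;> subst h <;> refine ⟨by omega, by omega, by omega, by omega⟩
      rw [loopA maze fuel n (maze.length : Int) ((PySem.List.pyGetD maze 0 []).length : Int)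
        [(r - 1, c), (r + 1, c), (r, c - 1), (r, c + 1)] o (vSet v r c true) 0
        (fun nb hnb => by
          obtain ⟨g1, g2, g3, g4⟩ := hnbrs nb hnb
          have := valid_iff maze v o r c nb.1 nb.2 hInv' g1 g2 g3 g4
          simpa using this)
        (fun nb hnb hno => by
          exact ih (PySem.Set.diff o [nb]) (vSet v r c true) nb.1 nb.2 (n + 1)
            (inv_step maze v o r c hInv' nb hno)
            (by have := pv_diff_singleton_length_lt o nb hno; omega))]
      rw [vSet_restore maze v r c hr0 hr1 hc0 hc1 hs hvrc]

-- whatever the nested start scan returns is an in-range 'k' cell (rows at least cols wide)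
theorem firstMatch_eq_index? (maze : List (List String)) (r : Int) : ∀ (m : Nat),
    m ≤ (PySem.List.pyGetD maze r []).length →
    (PySem.List.pyRange 0 (m : Int) 1).foldl (scanColsA maze r) none
    = (PySem.List.index? ((PySem.List.pyGetD maze r []).take m) "k").map (fun k => (k : Int)) := by
  intro m
  induction m with
  | zero =>
    intro _
    simp [PySem.List.pyRange_one_eq_nil]
  | succ m ih =>
    intro hm
    set xs := PySem.List.pyGetD maze r [] with hxs
    have hmlt : m < xs.length := by omega
    have hrange : PySem.List.pyRange 0 ((m + 1 : Nat) : Int) 1 =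
        PySem.List.pyRange 0 (m : Int) 1 ++ [(m : Int)] := by
      rw [show ((m + 1 : Nat) : Int) = (m : Int) + 1 by push_cast; ring]
      exact PySem.List.pyRange_one_succ_right (by positivity)
    have htake : xs.take (m + 1) = xs.take m ++ [xs[m]] := by
      rw [List.take_add_one, List.getElem?_eq_getElem hmlt]
      rfl
    rw [hrange, List.foldl_append, ih (by omega), htake]
    rcases Option.eq_none_or_eq_some (PySem.List.index? (xs.take m) "k") with hI | ⟨k, hI⟩
    case inr =>
      have hmem : "k" ∈ xs.take m := by
        have := (PySem.List.index?_isSome_iff (xs.take m) "k").mp (by rw [hI]; rfl)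
        exact this
      rw [PySem.List.index?_append_of_mem [xs[m]] hmem, hI]
      rfl
    case inl =>
      have hnmem : "k" ∉ xs.take m := (PySem.List.index?_eq_none_iff _ _).mp hI
      rw [hI]
      simp only [List.foldl_cons, List.foldl_nil, scanColsA, cellAt, ← hxs,
        PySem.List.pyGetD_natCast]
      rw [List.getD_eq_getElem _ _ hmlt]
      by_cases hk : xs[m] = "k"
      · rw [if_pos (by simp [hk])]
        rw [hk, PySem.List.index?_append_singleton_self _ _ hnmem]
        simp [List.length_take, Nat.min_eq_left (by omega : m ≤ xs.length)]
      · rw [if_neg (by simp [hk])]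
        have hnone : PySem.List.index? (xs.take m ++ [xs[m]]) "k" = none :=
          (PySem.List.index?_eq_none_iff (xs.take m ++ [xs[m]]) "k").mpr (by
            intro hcontra
            rcases List.mem_append.mp hcontra with h | h
            · exact hnmem h
            · exact hk (List.mem_singleton.mp h).symm)
        rw [hnone]
        rfl

-- re-expresses one step of the nested scan as a membership/index test on the clipped row
def scanRowB (maze : List (List String)) (st : Option (Int × Int)) (r : Int) : Option (Int × Int) :=
  let row := PySem.List.slice (PySem.List.pyGetD maze r [])
    none (some ((PySem.List.pyGetD maze 0 []).length : Int))
  if "k" ∈ row then some (r, (((PySem.List.index? row "k").getD 0 : Nat) : Int)) else st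

theorem scan_eq (maze : List (List String))
    (hw : ∀ row ∈ maze, (PySem.List.pyGetD maze 0 []).length ≤ row.length) :
    (PySem.List.pyRange 0 (maze.length : Int) 1).foldl (scanRowsA maze) none
    = (PySem.List.pyRange 0 (maze.length : Int) 1).foldl (scanRowB maze) none := by
  apply PySem.List.foldl_congr_mem
  intro st r hr
  have hr' := PySem.List.mem_pyRange_one.mp hr
  have hxl : (PySem.List.pyGetD maze 0 []).length ≤ (PySem.List.pyGetD maze r []).length := by
    rw [PySem.List.pyGetD_eq_getElem maze [] hr'.1 hr'.2]
    exact hw _ (List.getElem_mem _)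
  simp only [scanRowsA, scanRowB, PySem.List.slice_to_natCast]
  rw [firstMatch_eq_index? maze r _ hxl]
  rcases Option.eq_none_or_eq_some (PySem.List.index?
      ((PySem.List.pyGetD maze r []).take (PySem.List.pyGetD maze 0 []).length) "k") with hI | ⟨k, hI⟩
  · rw [hI, if_neg (by simpa using (PySem.List.index?_eq_none_iff _ _).mp hI)]
    rfl
  · rw [hI, if_pos (by
      have := (PySem.List.index?_isSome_iff ((PySem.List.pyGetD maze r []).take
        (PySem.List.pyGetD maze 0 []).length) "k").mp (by rw [hI]; rfl)
      simpa using this)]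
    simp

theorem scan_bounds (maze : List (List String)) (sr sc : Int)
    (h : (PySem.List.pyRange 0 (maze.length : Int) 1).foldl (scanRowB maze) none
      = some (sr, sc)) :
    0 ≤ sr ∧ sr < (maze.length : Int) ∧ 0 ≤ sc ∧
    sc < ((PySem.List.pyGetD maze 0 []).length : Int) ∧ cellAt maze sr sc = "k" := by
  have key : ∀ (l : List Int) (st : Option (Int × Int)),
      (∀ x ∈ l, 0 ≤ x ∧ x < (maze.length : Int)) →
      (∀ a b : Int, st = some (a, b) → 0 ≤ a ∧ a < (maze.length : Int) ∧ 0 ≤ b ∧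
        b < ((PySem.List.pyGetD maze 0 []).length : Int) ∧ cellAt maze a b = "k") →
      ∀ a b : Int, l.foldl (scanRowB maze) st = some (a, b) →
        0 ≤ a ∧ a < (maze.length : Int) ∧ 0 ≤ b ∧
        b < ((PySem.List.pyGetD maze 0 []).length : Int) ∧ cellAt maze a b = "k" := by
    intro l
    induction l with
    | nil => intro st _ hst a b hfold; exact hst a b hfold
    | cons x t iht =>
      intro st hmem hst a b hfold
      rw [List.foldl_cons] at hfold
      refine iht _ (fun y hy => hmem y (by simp [hy])) ?_ a b hfold
      intro a' b' hstep
      simp only [scanRowB] at hstep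
      by_cases hkin : "k" ∈ PySem.List.slice (PySem.List.pyGetD maze x [])
          none (some ((PySem.List.pyGetD maze 0 []).length : Int))
      · rw [if_pos hkin] at hstep
        obtain ⟨hax, hab⟩ : x = a' ∧
            ((((PySem.List.index? (PySem.List.slice (PySem.List.pyGetD maze x [])
              none (some ((PySem.List.pyGetD maze 0 []).length : Int))) "k").getD 0 : Nat)) : Int) = b' := by
          have := Option.some.inj hstep
          exact ⟨congrArg Prod.fst this, congrArg Prod.snd this⟩
        rw [PySem.List.slice_to_natCast] at hkin hab
        set xs := PySem.List.pyGetD maze x [] with hxs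
        rcases Option.eq_none_or_eq_some (PySem.List.index?
            (xs.take (PySem.List.pyGetD maze 0 []).length) "k") with hI | ⟨k, hI⟩
        · exact absurd ((PySem.List.index?_eq_none_iff _ _).mp hI) (by simpa using hkin)
        · obtain ⟨hklt, hkeq, _⟩ := PySem.List.getElem_of_index?_eq_some hI
          have hkm : k < (PySem.List.pyGetD maze 0 []).length := by
            have := hklt
            rw [List.length_take] at this
            omega
          have hkxs : k < xs.length := by
            have := hklt
            rw [List.length_take] at this
            omega
          have hb' : ((k : Nat) : Int) = b' := by rw [hI] at hab; simpa using hab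
          obtain ⟨hx0, hx1⟩ := hmem x (by simp)
          refine ⟨by omega, by omega, by omega, by omega, ?_⟩
          rw [← hax, ← hb']
          simp only [cellAt, ← hxs]
          rw [PySem.List.pyGetD_natCast, List.getD_eq_getElem _ _ hkxs]
          rw [List.getElem_take] at hkeq
          exact hkeq
      · rw [if_neg hkin] at hstep
        exact hst a' b' hstep
  exact key (PySem.List.pyRange 0 (maze.length : Int) 1) none
    (fun x hx => by
      have := PySem.List.mem_pyRange_one.mp hx
      exact ⟨this.1, this.2⟩)
    (by simp) sr sc h

theorem vGet_rep (maze : List (List String)) (r c : Int)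
    (hr0 : 0 ≤ r) (hr1 : r < (maze.length : Int)) (hc0 : 0 ≤ c)
    (hc1 : c < ((PySem.List.pyGetD maze 0 []).length : Int)) :
    vGet (List.replicate maze.length
      (List.replicate (PySem.List.pyGetD maze 0 []).length false)) r c = false := by
  unfold vGet
  rw [PySem.List.pyGetD_eq_getElem _ _ hr0 (by simp; omega)]
  rw [List.getElem_replicate]
  rw [PySem.List.pyGetD_eq_getElem _ _ hc0 (by simp; omega)]
  rw [List.getElem_replicate]

theorem mem_openList (maze : List (List String)) (p : Int × Int) :
    p ∈ ((PySem.List.pyRange 0 (maze.length : Int) 1).flatMap (fun r =>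
      ((PySem.List.pyRange 0 ((PySem.List.pyGetD maze 0 []).length : Int) 1).filter
        (fun c => !(cellAt maze r c == "#"))).map (fun c => (r, c))))
    ↔ (0 ≤ p.1 ∧ p.1 < (maze.length : Int) ∧ 0 ≤ p.2 ∧
       p.2 < ((PySem.List.pyGetD maze 0 []).length : Int) ∧ cellAt maze p.1 p.2 ≠ "#") := by
  simp only [List.mem_flatMap, List.mem_map, List.mem_filter, PySem.List.mem_pyRange_one]
  constructor
  · rintro ⟨r, hr, c, ⟨⟨hc, hcell⟩, hpc⟩⟩
    rw [← hpc]
    simp only []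
    refine ⟨hr.1, hr.2, hc.1, hc.2, by simpa using hcell⟩
  · rintro ⟨h1, h2, h3, h4, h5⟩
    exact ⟨p.1, ⟨h1, h2⟩, p.2, ⟨⟨⟨h3, h4⟩, by simpa using h5⟩, by simp⟩⟩

theorem sum_le_mul_of_forall_le (l : List Nat) (n : Nat) (h : ∀ x ∈ l, x ≤ n) :
    l.sum ≤ l.length * n := by
  induction l with
  | nil => simp
  | cons a t ih =>
    simp only [List.sum_cons, List.length_cons, Nat.succ_mul]
    have := ih (fun x hx => h x (by simp [hx]))
    have := h a (by simp)
    omega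

theorem openList_len (maze : List (List String)) :
    ((PySem.List.pyRange 0 (maze.length : Int) 1).flatMap (fun r =>
      ((PySem.List.pyRange 0 ((PySem.List.pyGetD maze 0 []).length : Int) 1).filter
        (fun c => !(cellAt maze r c == "#"))).map (fun c => (r, c)))).length
    ≤ maze.length * (PySem.List.pyGetD maze 0 []).length := by
  rw [List.length_flatMap]
  have hb := sum_le_mul_of_forall_le
    ((PySem.List.pyRange 0 (maze.length : Int) 1).map (fun r =>
      (((PySem.List.pyRange 0 ((PySem.List.pyGetD maze 0 []).length : Int) 1).filter
        (fun c => !(cellAt maze r c == "#"))).map (fun c => (r, c))).length))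
    (PySem.List.pyGetD maze 0 []).length
    (by
      intro x hx
      rcases List.mem_map.mp hx with ⟨r, _, hxr⟩
      rw [← hxr, List.length_map]
      calc (((PySem.List.pyRange 0 ((PySem.List.pyGetD maze 0 []).length : Int) 1).filter
            (fun c => !(cellAt maze r c == "#")))).length
          ≤ (PySem.List.pyRange 0 ((PySem.List.pyGetD maze 0 []).length : Int) 1).length :=
            List.length_filter_le _ _
        _ = (PySem.List.pyGetD maze 0 []).length := by
            rw [PySem.List.length_pyRange_one]; omega)
  calc ((PySem.List.pyRange 0 (maze.length : Int) 1).map _).sum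
      ≤ ((PySem.List.pyRange 0 (maze.length : Int) 1).map (fun r =>
          (((PySem.List.pyRange 0 ((PySem.List.pyGetD maze 0 []).length : Int) 1).filter
            (fun c => !(cellAt maze r c == "#"))).map (fun c => (r, c))).length)).length
          * (PySem.List.pyGetD maze 0 []).length := hb
    _ ≤ maze.length * (PySem.List.pyGetD maze 0 []).length := by
        rw [List.length_map, PySem.List.length_pyRange_one]
        apply Nat.mul_le_mul_right
        omega

-- ===== the stack machine simulates the recursive search =====

theorem runB_nil (maze : List (List String)) (f : Nat) (v : List (List Bool)) (best : Int) :
    runB maze f v best [] = best := by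
  cases f <;> rfl

theorem stepBound_le_succ (m : Nat) : stepBound m ≤ stepBound (m + 1) := by
  have h : stepBound (m + 1) = 5 + 4 * stepBound m := rfl
  omega

theorem stepBound_mono {a b : Nat} (h : a ≤ b) : stepBound a ≤ stepBound b := by
  induction b, h using Nat.le_induction with
  | base => exact le_refl _
  | succ b hab ih => exact le_trans ih (stepBound_le_succ b)

theorem tryMoves_max (rows cols : Int) :
    ∀ (ms o : List (Int × Int)) (n a b : Int),
    tryMoves ms o n (max a b) rows cols = max a (tryMoves ms o n b rows cols) := by
  intro ms
  induction ms with
  | nil => intro o n a b; simp [tryMoves]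
  | cons nb rest ih =>
    intro o n a b
    rw [tryMoves]
    conv_rhs => rw [tryMoves]
    by_cases h : nb ∈ o
    · rw [dif_pos h, dif_pos h, max_assoc, ih]
    · rw [dif_neg h, dif_neg h, ih]

theorem validB_mem (maze : List (List String)) (v : List (List Bool)) (o : List (Int × Int))
    (r c : Int) (hInv : InvW maze v o r c) (nb : Int × Int) :
    (validB maze (vSet v r c true) nb.1 nb.2 = true) ↔ nb ∈ o := by
  obtain ⟨hl, hrows, hnd, hr0, hr1, hc0, hc1, hvrc, hiff⟩ := hInv
  have hs : VShape maze v := ⟨hl, hrows⟩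
  unfold validB
  simp only [Bool.and_eq_true, decide_eq_true_eq, Bool.not_eq_true', beq_iff_eq]
  constructor
  · rintro ⟨⟨⟨⟨⟨h1, h2⟩, h3⟩, h4⟩, hw⟩, hv1⟩
    have hne : nb ≠ (r, c) := by
      intro he
      rw [show nb.1 = r from congrArg Prod.fst he, show nb.2 = c from congrArg Prod.snd he,
        vGet_vSet_self maze v r c true hr0 hr1 hc0 hc1 hs] at hv1
      exact Bool.true_eq_false.mp hv1
    have hvv : vGet v nb.1 nb.2 = false := by
      rw [← vGet_vSet_ne maze v r c nb.1 nb.2 true hr0 hr1 hc0 hc1 h1 h2 h3 h4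
        (by rw [Prod.mk.eta]; exact hne) hs]
      exact hv1
    exact (hiff nb).mpr ⟨h1, h2, h3, h4, by simpa using hw, hvv, hne⟩
  · intro h
    obtain ⟨p1, p2, p3, p4, pw, pv, pne⟩ := (hiff nb).mp h
    have hv1 : vGet (vSet v r c true) nb.1 nb.2 = false := by
      rw [vGet_vSet_ne maze v r c nb.1 nb.2 true hr0 hr1 hc0 hc1 p1 p2 p3 p4
        (by rw [Prod.mk.eta]; exact pne) hs]
      exact pv
    exact ⟨⟨⟨⟨⟨p1, p2⟩, p3⟩, p4⟩, by simpa using pw⟩, hv1⟩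

-- the head of the remaining moves is the indexed tuple access of the Python
theorem pyGetD_of_drop (xs : List (Int × Int)) (j : Nat) (a : Int × Int) (tl : List (Int × Int))
    (h : xs.drop j = a :: tl) : PySem.List.pyGetD xs (j : Int) (0, 0) = a := by
  have hj : xs[j]? = some a := by
    have h0 : (xs.drop j)[0]? = xs[j + 0]? := List.getElem?_drop
    rw [h] at h0
    simpa using h0.symm
  rw [PySem.List.pyGetD_natCast, List.getD_eq_getElem?_getD, hj]
  rfl

theorem drop_succ_of_drop (xs : List (Int × Int)) (j : Nat) (a : Int × Int) (tl : List (Int × Int))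
    (h : xs.drop j = a :: tl) : xs.drop (j + 1) = tl := by
  rw [← List.drop_drop, h]
  rfl

-- Processing one frame with remaining move list ms (index j) accumulates exactly
-- tryMoves ms into the running best and restores the visited matrix.
theorem runB_moves (maze : List (List String)) (o : List (Int × Int))
    (IHc : ∀ (o' : List (Int × Int)) (v' : List (List Bool)) (r' c' n' : Int),
      o'.length < o.length → InvW maze v' o' r' c' →
      ¬(r' = 0 ∨ r' = (maze.length : Int) - 1 ∨ c' = 0 ∨
        c' = ((PySem.List.pyGetD maze 0 []).length : Int) - 1) → 0 ≤ n' →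
      ∃ k, k ≤ stepBound o'.length ∧ ∀ (best : Int) (rest : List (Int × Int × Int × Int)) (fuel : Nat),
        0 ≤ best →
        runB maze (k + fuel) (vSet v' r' c' true) best ((r', c', n', 0) :: rest)
          = runB maze fuel v'
              (tryMoves (movesB r' c') o' n' best (maze.length : Int)
                ((PySem.List.pyGetD maze 0 []).length : Int)) rest)
    (v : List (List Bool)) (r c n : Int) (hInv : InvW maze v o r c)
    (hn : 0 ≤ n) :
    ∀ (ms : List (Int × Int)) (j : Nat),
      ms = (movesB r c).drop j → j + ms.length = 4 →
      ∃ k, k ≤ ms.length + 1 +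
          ms.length * (if o.length = 0 then 0 else stepBound (o.length - 1)) ∧
        ∀ (best : Int) (rest : List (Int × Int × Int × Int)) (fuel : Nat), 0 ≤ best →
          runB maze (k + fuel) (vSet v r c true) best ((r, c, n, (j : Int)) :: rest)
            = runB maze fuel v
                (tryMoves ms o n best (maze.length : Int)
                  ((PySem.List.pyGetD maze 0 []).length : Int)) rest := by
  have hInv' : InvW maze v o r c := hInv
  obtain ⟨hl, hrows, hnd, hr0, hr1, hc0, hc1, hvrc, hiff⟩ := hInv
  have hs : VShape maze v := ⟨hl, hrows⟩
  intro ms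
  induction ms with
  | nil =>
    intro j hdrop hlen
    have hj : j = 4 := by simpa using hlen
    subst hj
    refine ⟨1, by omega, ?_⟩
    intro best rest fuel hbest
    have h1 : 1 + fuel = fuel + 1 := by omega
    rw [h1, runB]
    rw [if_pos (by simp)]
    rw [vSet_restore maze v r c hr0 hr1 hc0 hc1 hs hvrc]
    rw [tryMoves]
  | cons nb ms' ih =>
    intro j hdrop hlen
    have hj3 : j ≤ 3 := by
      simp only [List.length_cons] at hlen
      omega
    have hhead := pyGetD_of_drop (movesB r c) j nb ms' hdrop.symm
    have htail := drop_succ_of_drop (movesB r c) j nb ms' hdrop.symm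
    obtain ⟨kr, hkr, hsemr⟩ := ih (j + 1) htail.symm
      (by simp only [List.length_cons] at hlen; omega)
    have hguard : ((j : Int) == 4) = false := by
      simp only [beq_eq_false_iff_ne, ne_eq]
      intro hcontra
      omega
    have hsucc : ((j : Int) + 1) = ((j + 1 : Nat) : Int) := by push_cast; ring
    set S : Nat := (if o.length = 0 then 0 else stepBound (o.length - 1)) with hS
    by_cases hmem : nb ∈ o
    · have hvalid : validB maze (vSet v r c true) nb.1 nb.2 = true :=
        (validB_mem maze v o r c hInv' nb).mpr hmem
      obtain ⟨g1, g2, g3, g4, hwall, hvnb, hner⟩ := (hiff nb).mp hmem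
      by_cases hbnd : nb.1 = 0 ∨ nb.1 = (maze.length : Int) - 1 ∨ nb.2 = 0 ∨
          nb.2 = ((PySem.List.pyGetD maze 0 []).length : Int) - 1
      · -- boundary neighbour: fold n+1 into the best, no push
        refine ⟨1 + kr, ?_, ?_⟩
        · have hm : ms'.length * S ≤ (ms'.length + 1) * S :=
            Nat.mul_le_mul_right S (Nat.le_succ _)
          simp only [List.length_cons]
          omega
        · intro best rest fuel hbest
          have h1 : 1 + kr + fuel = (kr + fuel) + 1 := by omega
          rw [h1]
          simp only [runB, hguard, Bool.false_eq_true, if_false, hhead, hvalid, if_true]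
          rw [if_pos (by
            simp only [Bool.or_eq_true, beq_iff_eq]
            tauto)]
          rw [hsucc, hsemr (max best (n + 1)) rest fuel (by omega)]
          conv_rhs => rw [tryMoves]
          rw [dif_pos hmem, longest_exit, if_pos hbnd]
      · -- interior neighbour: push a new frame, run the subsearch, then continue
        have hlt := pv_diff_singleton_length_lt o nb hmem
        obtain ⟨kc, hkc, hsemc⟩ := IHc (PySem.Set.diff o [nb]) (vSet v r c true) nb.1 nb.2 (n + 1)
          hlt (inv_step maze v o r c hInv' nb hmem) hbnd (by omega)
        refine ⟨1 + kc + kr, ?_, ?_⟩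
        · have hone : o.length ≠ 0 := by
            intro h0
            rw [List.length_eq_zero_iff] at h0
            subst h0
            simp at hmem
          have hSS : S = stepBound (o.length - 1) := by rw [hS, if_neg hone]
          have hkc' : kc ≤ S := by
            rw [hSS]
            exact le_trans hkc (stepBound_mono (by omega))
          have hmul : (ms'.length + 1) * S = ms'.length * S + S := by ring
          simp only [List.length_cons]
          omega
        · intro best rest fuel hbest
          have h1 : 1 + kc + kr + fuel = (kc + (kr + fuel)) + 1 := by omega
          rw [h1]
          simp only [runB, hguard, Bool.false_eq_true, if_false, hhead, hvalid, if_true]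
          rw [if_neg (by
            simp only [Bool.or_eq_true, beq_iff_eq]
            tauto)]
          rw [hsemc best ((r, c, n, (j : Int) + 1) :: rest) (kr + fuel) hbest]
          have hval : tryMoves (movesB nb.1 nb.2) (PySem.Set.diff o [nb]) (n + 1) best
              (maze.length : Int) ((PySem.List.pyGetD maze 0 []).length : Int)
              = max best (longest_exit (PySem.Set.diff o [nb]) nb.1 nb.2 (n + 1)
                  (maze.length : Int) ((PySem.List.pyGetD maze 0 []).length : Int)) := by
            rw [longest_exit, if_neg hbnd]
            conv_lhs => rw [show best = max best 0 from by omega]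
            rw [tryMoves_max]
            simp only [movesB]
          rw [hval, hsucc, hsemr _ rest fuel (by omega)]
          conv_rhs => rw [tryMoves]
          rw [dif_pos hmem]
    · have hvalid : validB maze (vSet v r c true) nb.1 nb.2 = false := by
        rw [← Bool.not_eq_true]
        intro hcontra
        exact hmem ((validB_mem maze v o r c hInv' nb).mp hcontra)
      refine ⟨1 + kr, ?_, ?_⟩
      · have hm : ms'.length * S ≤ (ms'.length + 1) * S :=
          Nat.mul_le_mul_right S (Nat.le_succ _)
        simp only [List.length_cons]
        omega
      · intro best rest fuel hbest
        have h1 : 1 + kr + fuel = (kr + fuel) + 1 := by omega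
        rw [h1]
        simp only [runB, hguard, Bool.false_eq_true, if_false, hhead, hvalid]
        rw [hsucc, hsemr best rest fuel hbest]
        conv_rhs => rw [tryMoves]
        rw [dif_neg hmem]

-- Entering an interior frame runs the whole subsearch and restores the state.
theorem runB_frame (maze : List (List String)) :
    ∀ (m : Nat) (o : List (Int × Int)) (v : List (List Bool)) (r c n : Int),
    o.length ≤ m → InvW maze v o r c →
    ¬(r = 0 ∨ r = (maze.length : Int) - 1 ∨ c = 0 ∨
      c = ((PySem.List.pyGetD maze 0 []).length : Int) - 1) → 0 ≤ n →
    ∃ k, k ≤ stepBound o.length ∧ ∀ (best : Int) (rest : List (Int × Int × Int × Int)) (fuel : Nat),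
      0 ≤ best →
      runB maze (k + fuel) (vSet v r c true) best ((r, c, n, 0) :: rest)
        = runB maze fuel v
            (tryMoves (movesB r c) o n best (maze.length : Int)
              ((PySem.List.pyGetD maze 0 []).length : Int)) rest := by
  intro m
  induction m with
  | zero =>
    intro o v r c n hm hInv hbnd hn
    obtain ⟨k, hk, hsem⟩ := runB_moves maze o
      (fun o' _ _ _ _ hlt _ _ _ => absurd hlt (by omega)) v r c n hInv hn
      (movesB r c) 0 (by simp) (by simp [movesB])
    refine ⟨k, ?_, ?_⟩
    · have ho : o.length = 0 := by omega
      simp [movesB, ho] at hk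
      rw [ho]
      have h5 : stepBound 0 = 5 := rfl
      omega
    · intro best rest fuel hbest
      have := hsem best rest fuel hbest
      simpa using this
  | succ m ih =>
    intro o v r c n hm hInv hbnd hn
    obtain ⟨k, hk, hsem⟩ := runB_moves maze o
      (fun o' v' r' c' n' hlt hI hb hn' => ih o' v' r' c' n' (by omega) hI hb hn')
      v r c n hInv hn (movesB r c) 0 (by simp) (by simp [movesB])
    refine ⟨k, ?_, ?_⟩
    · rcases Nat.eq_zero_or_pos o.length with ho | ho
      · simp [movesB, ho] at hk
        rw [ho]
        have h5 : stepBound 0 = 5 := rfl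
        omega
      · have hne : o.length ≠ 0 := by omega
        simp only [movesB, List.length_cons, List.length_nil, if_neg hne] at hk
        obtain ⟨t, ht⟩ : ∃ t, o.length = t + 1 := ⟨o.length - 1, by omega⟩
        rw [ht]
        rw [ht] at hk
        have hsb : stepBound (t + 1) = 5 + 4 * stepBound t := rfl
        have hsb2 : (t + 1) - 1 = t := by omega
        rw [hsb2] at hk
        omega
    · intro best rest fuel hbest
      have := hsem best rest fuel hbest
      simpa using this

-- ===== the main equality =====

theorem main_eq (maze : List (List String)) (hpre : Pre_find_way_out maze) :
    find_way_out maze = find_way_out_alt maze := by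
  obtain ⟨hnil, hwid, hk⟩ := hpre
  have h0 : PySem.List.pyGetD maze 0 [] = maze.headD [] := by
    cases maze with
    | nil => exact absurd rfl hnil
    | cons h t => rw [PySem.List.pyGetD_zero_cons]; rfl
  have hw : ∀ row ∈ maze, (PySem.List.pyGetD maze 0 []).length ≤ row.length := by
    rw [h0]; exact hwid
  simp only [find_way_out, find_way_out_alt, Int.toNat_natCast]
  rcases Option.eq_none_or_eq_some ((PySem.List.pyRange 0 (maze.length : Int) 1).foldl
      (scanRowsA maze) none) with hsc | ⟨⟨sr, sc⟩, hsc⟩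
  · rw [hsc]
  · rw [hsc]
    dsimp only
    have hscB : (PySem.List.pyRange 0 (maze.length : Int) 1).foldl (scanRowB maze) none
        = some (sr, sc) := by rw [← scan_eq maze hw, hsc]
    obtain ⟨hb0, hb1, hb2, hb3, hbk⟩ := scan_bounds maze sr sc hscB
    by_cases hbnd : sr = 0 ∨ sr = (maze.length : Int) - 1 ∨ sc = 0 ∨
        sc = ((PySem.List.pyGetD maze 0 []).length : Int) - 1
    · -- start on the boundary: dfs returns 1 immediately, the machine never starts
      have hA : (dfsA maze (maze.length * (PySem.List.pyGetD maze 0 []).length + 1)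
          (List.replicate maze.length (List.replicate (PySem.List.pyGetD maze 0 []).length false))
          sr sc 1).1 = 1 := by
        rw [dfsA, if_pos hbnd]
      rw [hA]
      have hcond : (sr == 0 || sr == (maze.length : Int) - 1 || sc == 0 ||
          sc == ((PySem.List.pyGetD maze 0 []).length : Int) - 1) = true := by
        simp only [Bool.or_eq_true, beq_iff_eq]
        tauto
      rw [if_pos hcond]
    · -- interior start: both sides compute the full search
      set openL : List (Int × Int) :=
        ((PySem.List.pyRange 0 (maze.length : Int) 1).flatMap (fun r =>
          ((PySem.List.pyRange 0 ((PySem.List.pyGetD maze 0 []).length : Int) 1).filter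
            (fun c => !(cellAt maze r c == "#"))).map (fun c => (r, c)))) with hopenL
      set o' : List (Int × Int) := PySem.Set.diff (PySem.Set.ofList openL) [(sr, sc)] with ho'
      set v0 : List (List Bool) := List.replicate maze.length
        (List.replicate (PySem.List.pyGetD maze 0 []).length false) with hv0
      have hInv : InvW maze v0 o' sr sc := by
        refine ⟨by simp [hv0], fun row hrow => by
            rw [List.eq_of_mem_replicate hrow]; simp,
          PySem.Set.nodup_diff _ _ (PySem.Set.nodup_ofList _),
          hb0, hb1, hb2, hb3, vGet_rep maze sr sc hb0 hb1 hb2 hb3, ?_⟩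
        intro p
        rw [ho', PySem.Set.mem_diff, PySem.Set.mem_ofList, hopenL, mem_openList]
        constructor
        · rintro ⟨⟨p1, p2, p3, p4, pw⟩, hpn⟩
          exact ⟨p1, p2, p3, p4, pw, vGet_rep maze p.1 p.2 p1 p2 p3 p4, by simpa using hpn⟩
        · rintro ⟨p1, p2, p3, p4, pw, _, pne⟩
          exact ⟨⟨p1, p2, p3, p4, pw⟩, by simpa using pne⟩
      have hlen : o'.length ≤ maze.length * (PySem.List.pyGetD maze 0 []).length := by
        have h1 : o'.length ≤ (PySem.Set.ofList openL).length := by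
          rw [ho']
          unfold PySem.Set.diff
          exact List.length_filter_le _ _
        have h2 := PySem.Set.length_ofList_le openL
        have h3 := openList_len maze
        rw [← hopenL] at h3
        omega
      -- A's side
      rw [dfs_eq maze (maze.length * (PySem.List.pyGetD maze 0 []).length + 1) o' v0 sr sc 1
        hInv (by omega)]
      -- B's side
      have hcondF : ¬ ((sr == 0 || sr == (maze.length : Int) - 1 || sc == 0 ||
          sc == ((PySem.List.pyGetD maze 0 []).length : Int) - 1) = true) := by
        simp only [Bool.or_eq_true, beq_iff_eq]
        tauto
      rw [if_neg hcondF]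
      obtain ⟨k, hkb, hsem⟩ := runB_frame maze o'.length o' v0 sr sc 1 (le_refl _) hInv hbnd
        (by omega)
      have hkN : k ≤ stepBound (maze.length * (PySem.List.pyGetD maze 0 []).length) :=
        le_trans hkb (stepBound_mono hlen)
      have hfuel : stepBound (maze.length * (PySem.List.pyGetD maze 0 []).length)
          = k + (stepBound (maze.length * (PySem.List.pyGetD maze 0 []).length) - k) := by
        omega
      rw [hfuel, hsem 0 [] _ (le_refl 0), runB_nil]
      rw [longest_exit, if_neg hbnd]
      simp only [movesB]

-- ===== VERDICT (by name: the statement is the Claim_ definition above) =====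
theorem find_way_out_spec : Claim_equal_find_way_out := by
  intro maze _ hpre
  unfold Spec_find_way_out
  exact main_eq maze hpre
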